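-- pv_equiv track=rewrite | github.com/eunhee-dev/problem-solving | 0x0f. sorting II/7795번. 먹을 것인가 먹힐 것인가/solve.py | solve
-- ===== SOURCE A (Python) =====
-- def solve(a: list[int], b: list[int]) -> int:
--     a.sort()
--     b.sort()
--
--     total_pairs = 0
--     b_idx = 0
--
--     for num_a in a:
--         while b_idx < len(b) and b[b_idx] < num_a:
--             b_idx += 1
--         total_pairs += b_idx  # 0 ~ b_idx-1 까지 총 b_idx 개
--
--     return total_pairs
-- ===== SOURCE B (Python) =====
-- def _bisect_left(xs, x):
--     lo, hi = 0, len(xs)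
--     while lo < hi:
--         mid = (lo + hi) // 2
--         if xs[mid] < x:
--             lo = mid + 1
--         else:
--             hi = mid
--     return lo
--
--
-- def solve(a: list[int], b: list[int]) -> int:
--     a.sort()
--     b.sort()
--     return sum(_bisect_left(b, num_a) for num_a in a)
-- ===== Notes on version B (the rewrite author's own statement) =====
-- stated objective: alternative
-- what changed: Replaces the carried two-pointer merge over the sorted lists by an independent hand-written binary search (bisect_left) into sorted b for each element of a, summed with sum(); both in-place sorts are kept so the argument mutation is identical.
import Mathlib
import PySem

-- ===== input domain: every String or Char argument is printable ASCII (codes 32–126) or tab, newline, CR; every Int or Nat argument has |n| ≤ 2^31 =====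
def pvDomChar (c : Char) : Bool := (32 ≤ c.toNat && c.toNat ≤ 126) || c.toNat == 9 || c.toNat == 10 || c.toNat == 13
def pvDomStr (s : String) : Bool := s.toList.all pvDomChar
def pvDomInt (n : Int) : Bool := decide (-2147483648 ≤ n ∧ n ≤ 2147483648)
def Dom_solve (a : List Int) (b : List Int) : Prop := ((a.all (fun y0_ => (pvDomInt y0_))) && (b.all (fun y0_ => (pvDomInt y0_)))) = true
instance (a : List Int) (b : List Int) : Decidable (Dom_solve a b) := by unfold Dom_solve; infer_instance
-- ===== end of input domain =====

-- B replaces A's carried two-pointer scan by an independent binary search per element of a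
-- (alternative decomposition, same asymptotic cost; both in-place sorts kept).
-- Equivalence is about the RETURN value; both versions sort a and b in place identically.

-- ===== PORT A =====
-- the inner 'while b_idx < len(b) and b[b_idx] < num_a: b_idx += 1' loop
def pvAdvance (b : List Int) (x : Int) (i : Nat) : Nat :=
  if h : i < b.length ∧ b[i]! < x then pvAdvance b x (i + 1) else i
termination_by b.length - i
decreasing_by omega

def solve (a : List Int) (b : List Int) : Int :=
  let sa := PySem.List.sorted a (fun x => x)
  let sb := PySem.List.sorted b (fun x => x)
  (sa.foldl (fun (st : Int × Nat) num_a =>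
      let j := pvAdvance sb num_a st.2
      (st.1 + (j : Int), j)) (0, 0)).1

-- ===== PORT B =====
-- hand-written _bisect_left: binary search, exact transliteration of Source B's while loop
def pvBisectLeft (xs : List Int) (x : Int) (lo hi : Nat) : Nat :=
  if h : lo < hi then
    if xs[(lo + hi) / 2]! < x then pvBisectLeft xs x ((lo + hi) / 2 + 1) hi
    else pvBisectLeft xs x lo ((lo + hi) / 2)
  else lo
termination_by hi - lo
decreasing_by all_goals omega

def solve_alt (a : List Int) (b : List Int) : Int :=
  let sa := PySem.List.sorted a (fun x => x)
  let sb := PySem.List.sorted b (fun x => x)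
  sa.foldl (fun s num_a => s + (pvBisectLeft sb num_a 0 sb.length : Int)) 0

-- ===== PRECONDITION & SPEC =====
def Spec_solve (a : List Int) (b : List Int) (out : Int) : Prop := out = solve_alt a b
instance (a : List Int) (b : List Int) (out : Int) : Decidable (Spec_solve a b out) := by unfold Spec_solve; infer_instance

-- ===== CLAIM (what is proved, stated in full; the proofs are below) =====
def Claim_equal_solve : Prop := ∀ (a : List Int) (b : List Int), Dom_solve a b → Spec_solve a b (solve a b)

-- ===== LEMMAS AND PROOFS =====

-- k is "the number of elements of l strictly below x" characterised positionally
def IsCnt (l : List Int) (x : Int) (k : Nat) : Prop :=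
  k ≤ l.length ∧ (∀ j (hj : j < l.length), j < k → l[j] < x) ∧
    (∀ j (hj : j < l.length), k ≤ j → x ≤ l[j])

theorem isCnt_unique {l : List Int} {x : Int} {k₁ k₂ : Nat}
    (h₁ : IsCnt l x k₁) (h₂ : IsCnt l x k₂) : k₁ = k₂ := by
  obtain ⟨hl₁, hlt₁, hge₁⟩ := h₁
  obtain ⟨hl₂, hlt₂, hge₂⟩ := h₂
  by_contra hne
  rcases Nat.lt_or_ge k₁ k₂ with h | h
  · have hk : k₁ < l.length := lt_of_lt_of_le h hl₂
    exact absurd (hlt₂ k₁ hk h) (not_lt.mpr (hge₁ k₁ hk le_rfl))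
  · rcases Nat.lt_or_ge k₂ k₁ with h' | h'
    · have hk : k₂ < l.length := lt_of_lt_of_le h' hl₁
      exact absurd (hlt₁ k₂ hk h') (not_lt.mpr (hge₂ k₂ hk le_rfl))
    · omega

theorem pairwise_le_getElem {l : List Int} (hp : l.Pairwise (· ≤ ·))
    {i j : Nat} (hj : j < l.length) (hij : i ≤ j) : l[i]'(lt_of_le_of_lt hij hj) ≤ l[j] := by
  rcases Nat.lt_or_ge i j with h | h
  · exact List.pairwise_iff_getElem.mp hp i j _ hj h
  · have : i = j := le_antisymm hij h
    subst this; exact le_rfl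

theorem pvAdvance_isCnt (l : List Int) (hp : l.Pairwise (· ≤ ·)) (x : Int) :
    ∀ i, i ≤ l.length → (∀ j (hj : j < l.length), j < i → l[j] < x) →
      IsCnt l x (pvAdvance l x i) := by
  suffices h : ∀ fuel i, l.length - i ≤ fuel → i ≤ l.length →
      (∀ j (hj : j < l.length), j < i → l[j] < x) → IsCnt l x (pvAdvance l x i) by
    intro i hi hlt
    exact h (l.length - i) i le_rfl hi hlt
  intro fuel
  induction fuel with
  | zero =>
    intro i hf hi hlt
    have hil : i = l.length := by omega
    rw [pvAdvance]
    have : ¬ (i < l.length ∧ l[i]! < x) := by omega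
    simp only [this, dite_false]
    exact ⟨hi, hlt, fun j hj hij => by omega⟩
  | succ n ih =>
    intro i hf hi hlt
    rw [pvAdvance]
    split
    · rename_i h
      obtain ⟨hil, hx⟩ := h
      rw [getElem!_pos l i hil] at hx
      exact ih (i + 1) (by omega) hil
        (fun j hj hji => by
          rcases Nat.lt_or_ge j i with h' | h'
          · exact hlt j hj h'
          · have : j = i := by omega
            subst this; exact hx)
    · rename_i h
      refine ⟨hi, hlt, fun j hj hij => ?_⟩
      have hil : i < l.length := lt_of_le_of_lt hij hj
      have : ¬ l[i]! < x := fun hc => h ⟨hil, hc⟩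
      rw [getElem!_pos l i hil] at this
      exact le_trans (not_lt.mp this) (pairwise_le_getElem hp hj hij)

theorem pvBisectLeft_isCnt (l : List Int) (hp : l.Pairwise (· ≤ ·)) (x : Int) :
    ∀ fuel lo hi, hi - lo ≤ fuel → lo ≤ hi → hi ≤ l.length →
      (∀ j (hj : j < l.length), j < lo → l[j] < x) →
      (∀ j (hj : j < l.length), hi ≤ j → x ≤ l[j]) →
      IsCnt l x (pvBisectLeft l x lo hi) := by
  intro fuel
  induction fuel with
  | zero =>
    intro lo hi hf hlo hhi h1 h2
    have : lo = hi := by omega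
    subst this
    rw [pvBisectLeft]
    simp only [lt_irrefl, dite_false]
    exact ⟨le_trans hlo hhi, h1, h2⟩
  | succ n ih =>
    intro lo hi hf hlo hhi h1 h2
    rw [pvBisectLeft]
    split
    · rename_i h
      have hmid : (lo + hi) / 2 < l.length := by omega
      rw [getElem!_pos l _ hmid]
      split
      · rename_i hx
        exact ih ((lo + hi) / 2 + 1) hi (by omega) (by omega) hhi
          (fun j hj hji => lt_of_le_of_lt
            (pairwise_le_getElem hp hmid (by omega)) hx) h2
      · rename_i hx
        exact ih lo ((lo + hi) / 2) (by omega) (by omega) (by omega) h1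
          (fun j hj hji => le_trans (not_lt.mp hx) (pairwise_le_getElem hp hj hji))
    · rename_i h
      have : lo = hi := by omega
      subst this
      exact ⟨hhi, h1, h2⟩

theorem fold_eq (sb : List Int) (hsb : sb.Pairwise (· ≤ ·)) :
    ∀ (l : List Int), l.Pairwise (· ≤ ·) → ∀ (t : Int) (i : Nat), i ≤ sb.length →
      (∀ x ∈ l, ∀ j (hj : j < sb.length), j < i → sb[j] < x) →
      (l.foldl (fun (st : Int × Nat) num_a =>
          let j := pvAdvance sb num_a st.2
          (st.1 + (j : Int), j)) (t, i)).1 =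
        l.foldl (fun s num_a => s + (pvBisectLeft sb num_a 0 sb.length : Int)) t := by
  intro l
  induction l with
  | nil => intro _ t i _ _; rfl
  | cons x rest ih =>
    intro hpl t i hi hinv
    have hA : IsCnt sb x (pvAdvance sb x i) :=
      pvAdvance_isCnt sb hsb x i hi (fun j hj hji => hinv x (List.mem_cons_self) j hj hji)
    have hB : IsCnt sb x (pvBisectLeft sb x 0 sb.length) :=
      pvBisectLeft_isCnt sb hsb x sb.length 0 sb.length (by omega) (Nat.zero_le _) le_rfl
        (by omega) (fun j hj hij => by omega)
    have hEq : pvAdvance sb x i = pvBisectLeft sb x 0 sb.length := isCnt_unique hA hB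
    simp only [List.foldl_cons]
    rw [hEq]
    exact ih (List.Pairwise.of_cons hpl) _ _ hB.1
      (fun y hy j hj hji => by
        rw [← hEq] at hji
        exact lt_of_lt_of_le (hA.2.1 j hj hji)
          ((List.pairwise_cons.mp hpl).1 y hy))

-- ===== VERDICT (by name: the statement is the Claim_ definition above) =====
theorem solve_spec : Claim_equal_solve := by
  intro a b _
  unfold Spec_solve solve solve_alt
  exact fold_eq (PySem.List.sorted b (fun x => x)) (PySem.List.sorted_pairwise b _)
    (PySem.List.sorted a (fun x => x)) (PySem.List.sorted_pairwise a _) 0 0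
    (Nat.zero_le _) (fun x _ j _ h => absurd h (Nat.not_lt_zero j))
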